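-- pv_equiv track=rewrite | github.com/dion-pham/leetcode_personal | structy-stack/nesting_score.py | nesting_score
-- ===== SOURCE A (Python) =====
-- def nesting_score(string):
--     pass  # todo
--     # when you see [, add it to the stack
--     # when you see ] and the top most item on stack is [,
--     # increase score by one
--
--     stack = [0]
--     for char in string:
--         if char == "[":
--             stack.append(0)
--         else:
--             popped = stack.pop()
--             if popped == 0:
--                 stack[-1] += 1
--             else:
--                 stack[-1] += popped * 2
--
--     return stack[0]
-- ===== SOURCE B (Python) =====
-- def nesting_score(string):
--     # Single pass, no stack: an empty pair closed at depth d contributes 2**(d-1);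
--     # "score" holds the value committed each time depth returns to 0, so content of
--     # brackets left unclosed at the end is naturally discarded.
--     score = 0    # committed total (value whenever depth is back to 0)
--     pending = 0  # contributions inside currently open brackets
--     d = 0        # current depth
--     prev_open = False  # whether the previous character was '['
--     for ch in string:
--         if ch == "[":
--             d += 1
--             prev_open = True
--         else:
--             weight = 1 << (d - 1)  # weight of a pair closed at this depth (d == 0: unmatched closer)
--             if prev_open:
--                 pending += weight
--             d -= 1
--             prev_open = False
--             if d == 0:
--                 score += pending
--                 pending = 0
--     return score
-- ===== Notes on version B (the rewrite author's own statement) =====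
-- stated objective: alternative
-- what changed: Replaces A's explicit stack of per-level scores by a single pass that keeps only a committed score, a pending sum of powers of two (an empty pair closed at depth d contributes 1 << (d-1)) and the current depth, using O(1) extra space instead of a stack.
import Mathlib
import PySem

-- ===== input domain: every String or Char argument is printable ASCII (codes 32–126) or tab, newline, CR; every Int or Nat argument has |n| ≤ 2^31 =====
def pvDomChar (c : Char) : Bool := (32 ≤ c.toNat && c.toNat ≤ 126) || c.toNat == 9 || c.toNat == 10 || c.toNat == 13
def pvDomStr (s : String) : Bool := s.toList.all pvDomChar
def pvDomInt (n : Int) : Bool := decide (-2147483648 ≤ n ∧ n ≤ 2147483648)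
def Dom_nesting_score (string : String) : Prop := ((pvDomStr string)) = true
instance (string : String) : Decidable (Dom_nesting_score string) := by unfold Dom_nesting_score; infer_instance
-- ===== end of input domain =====

-- B replaces A's explicit stack of per-level scores by a single pass keeping only a
-- committed score, a pending sum of powers of two and the current depth (O(1) extra space).

-- ===== PORT A =====
-- stack is kept with its TOP at the HEAD (Python appends/pops at the end);
-- `stack[0]` is therefore the last element.
def stepA (stack : List Int) (char : Char) : List Int :=
  if char = '[' then 0 :: stack
  else
    match stack with
    | popped :: top :: rest => (top + (if popped = 0 then 1 else popped * 2)) :: rest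
    | _ => []  -- Python raises IndexError here (pop / stack[-1] on too-short stack); excluded by Pre_

def nesting_score (string : String) : Int :=
  (string.toList.foldl stepA [0]).getLastD 0

-- ===== PORT B =====
-- state (score, pending, d, prev_open); `1 << (d-1)` is ported as 2 ^ (d-1).toNat,
-- exact whenever d ≥ 1 (when prev_open is true and Pre_ holds, d ≥ 1; for d ≤ 0 Python raises).
def stepB (st : Int × Int × Int × Bool) (ch : Char) : Int × Int × Int × Bool :=
  match st with
  | (score, pending, d, prev_open) =>
    if ch = '[' then (score, pending, d + 1, true)
    else
      let weight : Int := 2 ^ (d - 1).toNat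
      let pending := if prev_open then pending + weight else pending
      let d := d - 1
      if d = 0 then (score + pending, 0, d, false) else (score, pending, d, false)

def nesting_score_alt (string : String) : Int :=
  (string.toList.foldl stepB (0, 0, 0, false)).1

-- ===== PRECONDITION & SPEC =====
-- Pre_ excludes exactly the inputs on which A raises IndexError: some prefix contains
-- more non-'[' characters (which all act as closers) than '[' characters.
def Pre_nesting_score (string : String) : Prop :=
  ∀ n < string.toList.length + 1,
    (string.toList.take n).countP (fun c => !(c == '['))
      ≤ (string.toList.take n).countP (fun c => c == '[')
instance (string : String) : Decidable (Pre_nesting_score string) := by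
  unfold Pre_nesting_score; infer_instance

def pvWitness_nesting_score : String := "[[]][]"

def Spec_nesting_score (string : String) (out : Int) : Prop := out = nesting_score_alt string
instance (string : String) (out : Int) : Decidable (Spec_nesting_score string out) := by unfold Spec_nesting_score; infer_instance

-- ===== CLAIM (what is proved, stated in full; the proofs are below) =====
def Claim_equal_nesting_score : Prop := ∀ (string : String), Dom_nesting_score string → Pre_nesting_score string → Spec_nesting_score string (nesting_score string)

-- ===== LEMMAS AND PROOFS =====

-- pending sum of a stack (top at head): each entry except the bottom one, weighted by
-- 2 ^ (its height above the bottom).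
def pend : List Int → Int
  | x :: y :: t => x * 2 ^ (y :: t).length + pend (y :: t)
  | _ => 0

lemma main (r : List Char) : ∀ (t : List Int) (x : Int) (prev : Bool),
    (∀ a ∈ x :: t, 0 ≤ a) →
    (prev = true → x = 0) →
    (prev = false → t = [] ∨ x ≠ 0) →
    (∀ n, ((r.take n).countP (fun c => !(c == '['))) ≤ t.length + (r.take n).countP (fun c => c == '[')) →
    (List.foldl stepA (x :: t) r).getLastD 0
      = (List.foldl stepB ((x :: t).getLastD 0, pend (x :: t), (t.length : Int), prev) r).1 := by
  induction r with
  | nil => intro t x prev _ _ _ _; simp [List.foldl]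
  | cons c r ih =>
    intro t x prev h0 hpT hpF hbal
    by_cases hc : c = '['
    · subst hc
      have hbal' : ∀ n, ((r.take n).countP (fun c => !(c == '['))) ≤ (x :: t).length + (r.take n).countP (fun c => c == '[') := by
        intro n
        have h := hbal (n+1)
        simp [List.take_succ_cons] at h
        simp only [List.length_cons]
        omega
      have key := ih (x :: t) 0 true (by
          intro a ha
          rcases List.mem_cons.mp ha with h | h
          · omega
          · exact h0 a h)
        (fun _ => rfl) (by simp) hbal'
      simp only [List.foldl_cons, stepA, stepB] at *
      simpa [pend, List.getLastD_cons, List.length_cons, Int.natCast_succ] using key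
    · -- c acts as a closer
      have ht : t ≠ [] := by
        intro h
        have h1 := hbal 1
        simp [List.take_succ_cons, hc, h] at h1
      obtain ⟨y, t', rfl⟩ := List.exists_cons_of_ne_nil ht
      have hx0 : 0 ≤ x := h0 x (by simp)
      have hy0 : 0 ≤ y := h0 y (by simp)
      have hxpos : prev = false → 1 ≤ x := by
        intro h
        rcases hpF h with h' | h'
        · exact absurd h' (by simp)
        · omega
      have hinc : 1 ≤ (if x = 0 then 1 else x * 2) := by split_ifs with h <;> omega
      have hbal' : ∀ n, ((r.take n).countP (fun c => !(c == '['))) ≤ t'.length + (r.take n).countP (fun c => c == '[') := by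
        intro n
        have h := hbal (n+1)
        simp [List.take_succ_cons, hc] at h
        omega
      have key := ih t' (y + (if x = 0 then 1 else x * 2)) false (by
          intro a ha
          rcases List.mem_cons.mp ha with h | h
          · omega
          · exact h0 a (by simp [h]))
        (by intro h; cases h) (fun _ => by
          cases t' with
          | nil => exact Or.inl rfl
          | cons w t'' => exact Or.inr (by omega)) hbal'
      have hA : stepA (x :: y :: t') c = (y + (if x = 0 then 1 else x * 2)) :: t' := by
        simp [stepA, hc]
      rw [List.foldl_cons, hA, key, List.foldl_cons]
      congr 1
      -- the two B-side states after this step agree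
      cases t' with
      | nil =>
        cases prev with
        | true =>
          have hx : x = 0 := hpT rfl
          subst hx
          simp [stepB, hc, pend]
        | false =>
          have hx : x ≠ 0 := by have := hxpos rfl; omega
          simp [stepB, hc, pend, hx]
      | cons w t'' =>
        have hne : ((t''.length : Int) + 1) ≠ 0 := by omega
        have e : ((t''.length : Int) + 1).toNat = t''.length + 1 := by omega
        apply congrArg (fun st => List.foldl stepB st r)
        cases prev with
        | true =>
          have hx : x = 0 := hpT rfl
          subst hx
          simp [stepB, hc, pend, hne, e, Prod.mk.injEq]
          ring
        | false =>
          have hx : x ≠ 0 := by have := hxpos rfl; omega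
          simp [stepB, hc, hx, pend, hne, Prod.mk.injEq]
          ring

theorem nesting_score_spec : Claim_equal_nesting_score := by
  intro s hdom hpre
  show nesting_score s = nesting_score_alt s
  unfold nesting_score nesting_score_alt
  have hbal : ∀ n, ((s.toList.take n).countP (fun c => !(c == '['))) ≤ ([] : List Int).length + (s.toList.take n).countP (fun c => c == '[') := by
    intro n
    by_cases hn : n < s.toList.length + 1
    · simpa using hpre n hn
    · have h1 : s.toList.take n = s.toList := List.take_of_length_le (by omega)
      have h2 := hpre s.toList.length (by omega)
      rw [List.take_length] at h2
      simpa [h1] using h2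
  have key := main s.toList [] 0 false (by intro a ha; simp at ha; omega)
    (by intro h; cases h) (fun _ => Or.inl rfl) hbal
  simpa [pend] using key
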